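-- pv_equiv track=rewrite | github.com/srikanth7666/codemind-python | Small_Factorials.py | f
-- ===== SOURCE A (Python) =====
-- def f(n):
--   if n==0:
--      return 0
--   elif n==1:
--      return 1
--   else:
--     k=1
--     for i in range(1,n+1):
--       k=k*i
--     return k
-- ===== SOURCE B (Python) =====
-- def f(n):
--     if n == 0:
--         return 0
--     return _prod_range(1, n)
--
-- def _prod_range(lo, hi):
--     # product of the integers lo..hi inclusive, by binary splitting
--     if hi < lo:
--         return 1
--     if lo == hi:
--         return lo
--     mid = (lo + hi) // 2
--     return _prod_range(lo, mid) * _prod_range(mid + 1, hi)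
-- ===== Notes on version B (the rewrite author's own statement) =====
-- stated objective: alternative
-- what changed: Replaces the linear left-to-right accumulation loop by a divide-and-conquer binary-splitting product of 1..n (with the n==0 -> 0 special case kept), which balances operand sizes and uses O(log n) recursion depth instead of an O(n) sequential loop.
import Mathlib
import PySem

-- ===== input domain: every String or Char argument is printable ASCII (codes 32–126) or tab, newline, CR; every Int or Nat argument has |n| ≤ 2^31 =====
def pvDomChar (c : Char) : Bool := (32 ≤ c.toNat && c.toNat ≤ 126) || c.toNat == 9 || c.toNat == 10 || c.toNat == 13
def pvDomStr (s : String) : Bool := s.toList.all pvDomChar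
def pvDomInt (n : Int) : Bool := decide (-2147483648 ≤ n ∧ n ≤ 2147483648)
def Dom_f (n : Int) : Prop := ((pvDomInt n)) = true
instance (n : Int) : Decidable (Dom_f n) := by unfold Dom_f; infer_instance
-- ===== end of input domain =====

-- B replaces A's linear accumulation loop by a binary-splitting product of 1..n (alternative decomposition, same asymptotic cost).


-- ===== PORT A =====
def f (n : Int) : Int :=
  if n = 0 then 0
  else if n = 1 then 1
  else (PySem.List.pyRange 1 (n+1) 1).foldl (fun k i => k * i) 1

-- ===== PORT B =====
-- product of the integers lo..hi inclusive, by binary splitting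
-- (fuel = interval length bounds the recursion depth and makes it structural;
--  fuel 0 is only reached on empty intervals, where the product is 1)
def prodRangeAux : Nat → Int → Int → Int
  | 0, _, _ => 1
  | fuel+1, lo, hi =>
    if hi < lo then 1
    else if lo = hi then lo
    else
      let mid := PySem.Int.floordiv (lo + hi) 2
      prodRangeAux fuel lo mid * prodRangeAux fuel (mid + 1) hi

def prodRange (lo hi : Int) : Int := prodRangeAux (hi + 1 - lo).toNat lo hi

def f_alt (n : Int) : Int :=
  if n = 0 then 0
  else prodRange 1 n

-- ===== PRECONDITION & SPEC =====
def Spec_f (n : Int) (out : Int) : Prop := out = f_alt n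
instance (n : Int) (out : Int) : Decidable (Spec_f n out) := by unfold Spec_f; infer_instance

-- ===== CLAIM (what is proved, stated in full; the proofs are below) =====
def Claim_equal_f : Prop := ∀ (n : Int), Dom_f n → Spec_f n (f n)

-- ===== LEMMAS AND PROOFS =====
theorem prodRangeAux_eq (fuel : Nat) : ∀ (lo hi : Int), (hi + 1 - lo).toNat ≤ fuel →
    prodRangeAux fuel lo hi = (PySem.List.pyRange lo (hi+1) 1).prod := by
  induction fuel with
  | zero =>
    intro lo hi hle
    rw [PySem.List.pyRange_one_eq_nil (by omega)]
    rfl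
  | succ fuel ih =>
    intro lo hi hle
    by_cases hlt : hi < lo
    · simp only [prodRangeAux, if_pos hlt]
      rw [PySem.List.pyRange_one_eq_nil (by omega)]
      rfl
    · by_cases heq : lo = hi
      · subst heq
        simp only [prodRangeAux, if_neg hlt]
        rw [PySem.List.pyRange_one_singleton]
        simp
      · have hm : PySem.Int.floordiv (lo + hi) 2 = (lo + hi).fdiv 2 := rfl
        have hb : lo ≤ (lo + hi).fdiv 2 ∧ (lo + hi).fdiv 2 < hi := by
          rw [Int.fdiv_eq_ediv]; omega
        simp only [prodRangeAux, if_neg hlt, if_neg heq]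
        rw [ih lo (PySem.Int.floordiv (lo + hi) 2) (by rw [hm]; omega),
            ih (PySem.Int.floordiv (lo + hi) 2 + 1) hi (by rw [hm]; omega),
            PySem.List.pyRange_one_append lo (PySem.Int.floordiv (lo + hi) 2 + 1) (hi + 1)
              (by rw [hm]; omega) (by rw [hm]; omega),
            List.prod_append]

theorem prodRange_eq (lo hi : Int) : prodRange lo hi = (PySem.List.pyRange lo (hi+1) 1).prod :=
  prodRangeAux_eq _ lo hi le_rfl

theorem foldl_mul_eq_prod (l : List Int) : l.foldl (fun k i => k * i) 1 = l.prod := by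
  rw [List.prod_eq_foldl]

-- ===== VERDICT (by name: the statement is the Claim_ definition above) =====
theorem f_spec : Claim_equal_f := by
  intro n _
  unfold Spec_f f f_alt
  by_cases h0 : n = 0
  · simp [h0]
  · by_cases h1 : n = 1
    · subst h1
      simp [prodRange, prodRangeAux]
    · rw [prodRange_eq, foldl_mul_eq_prod]
      simp [h0, h1]
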